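-- pv_equiv track=rewrite | github.com/goldsborough/algs4 | analysis/threesum.py | threesumB
-- ===== SOURCE A (Python) =====
-- def find(sequence, value):
-- 	if not sequence:
-- 		return False
-- 	mid = len(sequence)//2
-- 	if value < sequence[mid]:
-- 		return find(sequence[:mid], value)
-- 	elif value > sequence[mid]:
-- 		return find(sequence[mid + 1:], value)
-- 	else:
-- 		return True
--
-- def threesumB(sequence):
-- 	count = 0
-- 	length = len(sequence)
-- 	sequence.sort()
-- 	for i in range(length):
-- 		for j in range(i + 1, length):
-- 			value = sequence[i] + sequence[j]
-- 			if find(sequence[j + 1:], -value):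
-- 				count += 1
-- 	return count
-- ===== SOURCE B (Python) =====
-- def threesumB(sequence):
--     sequence.sort()
--     n = len(sequence)
--     last = {}
--     for idx, v in enumerate(sequence):
--         last[v] = idx
--     count = 0
--     for i in range(n):
--         for j in range(i + 1, n):
--             if last.get(-(sequence[i] + sequence[j]), -1) > j:
--                 count += 1
--     return count
-- ===== Notes on version B (the rewrite author's own statement) =====
-- stated objective: faster
-- what changed: Replaced the per-pair slice-and-recursive-binary-search (which copies an O(n) slice for every pair) with one precomputed last-occurrence dictionary, so each pair is decided by a single hash lookup compared against j.
import Mathlib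
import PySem

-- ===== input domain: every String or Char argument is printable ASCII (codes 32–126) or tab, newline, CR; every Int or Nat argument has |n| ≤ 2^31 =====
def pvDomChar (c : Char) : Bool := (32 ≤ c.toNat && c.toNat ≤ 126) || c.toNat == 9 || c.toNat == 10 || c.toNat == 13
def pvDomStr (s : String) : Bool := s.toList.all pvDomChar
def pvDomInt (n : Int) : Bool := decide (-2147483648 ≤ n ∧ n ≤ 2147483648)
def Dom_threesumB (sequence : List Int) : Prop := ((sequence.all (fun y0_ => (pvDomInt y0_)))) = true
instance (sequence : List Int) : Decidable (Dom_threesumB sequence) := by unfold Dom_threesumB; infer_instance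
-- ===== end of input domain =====

-- B replaces A's per-pair slice + recursive binary search by one precomputed last-occurrence
-- dictionary (faster). Both Pythons sort `sequence` in place; the theorems are about the return value.

-- ===== PORT A =====
-- A's helper `find`: recursive binary search over slices.  sequence[:mid] / sequence[mid+1:] with
-- nonnegative bounds are exactly List.take / List.drop (PySem.List.slice_to_natCast / slice_from_natCast),
-- and sequence[mid] with 0 ≤ mid < len is exactly getD (PySem.List.pyGetD_natCast).
def findA (s : List Int) (v : Int) : Bool :=
  if h : s = [] then false
  else
    let mid := s.length / 2
    let m := s.getD mid 0
    if v < m then findA (s.take mid) v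
    else if m < v then findA (s.drop (mid + 1)) v
    else true
termination_by s.length
decreasing_by
  · have hl : 0 < s.length := List.length_pos_iff.mpr h
    simp [List.length_take]; omega
  · have hl : 0 < s.length := List.length_pos_iff.mpr h
    simp; omega

def threesumB (sequence : List Int) : Int :=
  let count : Int := 0
  let length : Int := sequence.length
  let s := PySem.List.sorted sequence (fun x => x) false
  (PySem.List.pyRange 0 length 1).foldl (fun count i =>
    (PySem.List.pyRange (i + 1) length 1).foldl (fun count j =>
      let value := PySem.List.pyGetD s i 0 + PySem.List.pyGetD s j 0
      if findA (PySem.List.slice s (some (j + 1)) none) (-value) then count + 1 else count)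
      count) count

-- ===== PORT B =====
def threesumB_alt (sequence : List Int) : Int :=
  let s := PySem.List.sorted sequence (fun x => x) false
  let n : Int := s.length
  let last := (PySem.List.enumerate s 0).foldl (fun d p => d.insert p.2 p.1)
    (PySem.Dict.empty : PySem.Dict Int Int)
  (PySem.List.pyRange 0 n 1).foldl (fun count i =>
    (PySem.List.pyRange (i + 1) n 1).foldl (fun count j =>
      if last.getD (-(PySem.List.pyGetD s i 0 + PySem.List.pyGetD s j 0)) (-1) > j
      then count + 1 else count)
      count) 0

-- ===== PRECONDITION & SPEC =====
def Spec_threesumB (sequence : List Int) (out : Int) : Prop := out = threesumB_alt sequence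
instance (sequence : List Int) (out : Int) : Decidable (Spec_threesumB sequence out) := by unfold Spec_threesumB; infer_instance

-- ===== CLAIM (what is proved, stated in full; the proofs are below) =====
def Claim_equal_threesumB : Prop := ∀ (sequence : List Int), Dom_threesumB sequence → Spec_threesumB sequence (threesumB sequence)

-- ===== LEMMAS AND PROOFS =====

-- A's binary search over a sorted list decides membership
theorem findA_iff_aux (n : Nat) : ∀ (s : List Int), s.length ≤ n → s.Pairwise (· ≤ ·) →
    ∀ v : Int, (findA s v = true ↔ v ∈ s) := by
  induction n with
  | zero =>
    intro s hlen _ v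
    have : s = [] := List.eq_nil_of_length_eq_zero (Nat.le_zero.mp hlen)
    subst this; rw [findA]; simp
  | succ n ih =>
    intro s hlen hs v
    rw [findA]
    by_cases hnil : s = []
    · simp [hnil]
    · simp only [dif_neg hnil]
      have hpos : 0 < s.length := List.length_pos_iff.mpr hnil
      have hmid : s.length / 2 < s.length := Nat.div_lt_self hpos (by omega)
      have hm : s.getD (s.length / 2) 0 = s[s.length / 2] := List.getD_eq_getElem s 0 hmid
      have hs' : ∀ (i j : Nat) (hi : i < s.length) (hj : j < s.length), i < j → s[i] ≤ s[j] :=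
        fun i j hi hj hij => (List.pairwise_iff_getElem.mp hs) i j hi hj hij
      have hub : ∀ a ∈ s.take (s.length / 2), a ≤ s[s.length / 2] := by
        intro a ha
        obtain ⟨k, hk, hke⟩ := List.getElem_of_mem ha
        have hk' : k < s.length / 2 := by
          have := hk; simp [List.length_take] at this; omega
        rw [← hke, List.getElem_take]
        exact hs' k _ (by omega) hmid hk'
      have hlb : ∀ b ∈ s.drop (s.length / 2 + 1), s[s.length / 2] ≤ b := by
        intro b hb
        obtain ⟨k, hk, hke⟩ := List.getElem_of_mem hb
        rw [← hke, List.getElem_drop]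
        exact hs' _ _ hmid (by simp at hk; omega) (by omega)
      have hsplit : s.take (s.length / 2) ++ s[s.length / 2] :: s.drop (s.length / 2 + 1) = s := by
        rw [List.getElem_cons_drop, List.take_append_drop]
      have hmem : v ∈ s ↔ v ∈ s.take (s.length / 2) ∨ v = s[s.length / 2] ∨ v ∈ s.drop (s.length / 2 + 1) := by
        constructor
        · intro h
          rw [← hsplit] at h
          rcases List.mem_append.mp h with h | h
          · exact Or.inl h
          · rcases List.mem_cons.mp h with h | h
            · exact Or.inr (Or.inl h)
            · exact Or.inr (Or.inr h)
        · rintro (h | h | h)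
          · exact List.mem_of_mem_take h
          · exact h ▸ List.getElem_mem hmid
          · exact List.mem_of_mem_drop h
      split_ifs with h1 h2
      · rw [ih (s.take (s.length / 2)) (by simp [List.length_take]; omega)
            (hs.sublist (List.take_sublist _ _)) v, hmem]
        constructor
        · exact fun h => Or.inl h
        · rintro (h | h | h)
          · exact h
          · exfalso; rw [hm] at h1; omega
          · exfalso; have := hlb v h; rw [hm] at h1; omega
      · rw [ih (s.drop (s.length / 2 + 1)) (by simp; omega)
            (hs.sublist (List.drop_sublist _ _)) v, hmem]
        constructor
        · exact fun h => Or.inr (Or.inr h)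
        · rintro (h | h | h)
          · exfalso; have := hub v h; rw [hm] at h2; omega
          · exfalso; rw [hm] at h2; omega
          · exact h
      · have hv : v = s[s.length / 2] := by rw [hm] at h1 h2; omega
        simp [hv]

theorem findA_iff (s : List Int) (hs : s.Pairwise (· ≤ ·)) (v : Int) :
    findA s v = true ↔ v ∈ s :=
  findA_iff_aux s.length s (le_refl _) hs v

-- B's dict holds the last index of each value: its entry exceeds j iff the value occurs after j
theorem lastD_gt_iff (s : List Int) (v : Int) (j : Nat) :
    ((PySem.List.enumerate s 0).foldl (fun d p => d.insert p.2 p.1)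
      (PySem.Dict.empty : PySem.Dict Int Int)).getD v (-1) > (j : Int)
    ↔ v ∈ s.drop (j + 1) := by
  induction s using List.reverseRecOn with
  | nil => simp [PySem.List.enumerate_nil, PySem.Dict.getD_empty]
  | append_singleton l x ih =>
    rw [PySem.List.enumerate_append, List.foldl_append] at *
    simp only [PySem.List.enumerate_cons, PySem.List.enumerate_nil, List.foldl_cons, List.foldl_nil] at *
    rw [PySem.Dict.getD_insert]
    by_cases hv : v = x
    · subst hv
      by_cases hj : j + 1 ≤ l.length
      · rw [List.drop_append_of_le_length hj]
        simp; omega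
      · rw [List.drop_eq_nil_of_le (by simp; omega)]
        simp; omega
    · rw [if_neg hv, ih]
      by_cases hj : j + 1 ≤ l.length
      · rw [List.drop_append_of_le_length hj]; simp [hv]
      · rw [List.drop_eq_nil_of_le (as := l ++ [x]) (by simp; omega),
            List.drop_eq_nil_of_le (as := l) (by omega)]

-- ===== VERDICT (by name: the statement is the Claim_ definition above) =====
theorem threesumB_spec : Claim_equal_threesumB := by
  intro seq _
  unfold Spec_threesumB threesumB threesumB_alt
  simp only [PySem.List.length_sorted]
  apply PySem.List.foldl_congr_mem
  intro acc i hi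
  apply PySem.List.foldl_congr_mem
  intro acc' j hj
  rw [PySem.List.mem_pyRange_one] at hi hj
  have hts : (PySem.List.sorted seq (fun x => x) false).Pairwise (· ≤ ·) :=
    PySem.List.sorted_pairwise seq (fun x => x)
  have h0j : (0 : Int) ≤ j := by omega
  have hslice : PySem.List.slice (PySem.List.sorted seq (fun x => x) false) (some (j + 1)) none
      = (PySem.List.sorted seq (fun x => x) false).drop (j + 1).toNat :=
    PySem.List.slice_from _ (by omega)
  have hdrop : (j + 1).toNat = j.toNat + 1 := by omega
  have hiff : (findA ((PySem.List.sorted seq (fun x => x) false).drop (j.toNat + 1))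
        (-(PySem.List.pyGetD (PySem.List.sorted seq (fun x => x) false) i 0
           + PySem.List.pyGetD (PySem.List.sorted seq (fun x => x) false) j 0)) = true)
      ↔ ((PySem.List.enumerate (PySem.List.sorted seq (fun x => x) false) 0).foldl
          (fun d p => d.insert p.2 p.1) (PySem.Dict.empty : PySem.Dict Int Int)).getD
          (-(PySem.List.pyGetD (PySem.List.sorted seq (fun x => x) false) i 0
             + PySem.List.pyGetD (PySem.List.sorted seq (fun x => x) false) j 0)) (-1) > j := by
    rw [findA_iff _ (hts.sublist (List.drop_sublist _ _)) _]
    have h := lastD_gt_iff (PySem.List.sorted seq (fun x => x) false)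
      (-(PySem.List.pyGetD (PySem.List.sorted seq (fun x => x) false) i 0
         + PySem.List.pyGetD (PySem.List.sorted seq (fun x => x) false) j 0)) j.toNat
    rw [Int.toNat_of_nonneg h0j] at h
    exact h.symm
  rw [hslice, hdrop, if_congr hiff rfl rfl]
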